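-- pv_equiv track=rewrite | github.com/Sietse-van-Meer/MSc-BAOR-Thesis-Code-Comparing-Objective-Guidance-algorithms-for-Supply-Chain-Planning-Problems | Criterion 1 and 2, Main objective value and SD tests/Heuristic methods and ILP/ILP solver (Gurobi).py | check_connected_ones
-- ===== SOURCE A (Python) =====
-- def check_connected_ones(delta_values):
--     """Check if all 1's in the binary string are connected without being split by '0's."""
--     found_one = False  # Flag to indicate we've found at least one '1'
--     previous_was_one = False  # Flag to keep track of whether the previous value was '1'
--
--     for value in delta_values:
--         if value == 1:
--             if not found_one:  # Start of a new sequence of '1's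
--                 found_one = True
--             elif not previous_was_one:  # Found a '1' after a '0'
--                 return False
--             previous_was_one = True
--         else:
--             previous_was_one = False  # Reset this since we're at a '0'
--
--     return found_one  # Only return True if there was at least one '1'
-- ===== SOURCE B (Python) =====
-- def check_connected_ones(delta_values):
--     """Check if all 1's in the binary string are connected without being split by '0's."""
--     n = len(delta_values)
--     i = 0
--     while i < n and delta_values[i] != 1:   # skip the prefix before the first 1
--         i += 1
--     if i == n:                              # no 1 at all
--         return False
--     while i < n and delta_values[i] == 1:   # skip the (first) run of 1's
--         i += 1
--     return 1 not in delta_values[i:]        # connected iff no 1 remains after the run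
-- ===== Notes on version B (the rewrite author's own statement) =====
-- stated objective: simpler
-- what changed: Replaces A's single pass with two running flags and a mid-loop early return by a three-phase scan: advance past the prefix before the first 1, advance past the run of 1's, then report whether any 1 remains in the rest.
import Mathlib
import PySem

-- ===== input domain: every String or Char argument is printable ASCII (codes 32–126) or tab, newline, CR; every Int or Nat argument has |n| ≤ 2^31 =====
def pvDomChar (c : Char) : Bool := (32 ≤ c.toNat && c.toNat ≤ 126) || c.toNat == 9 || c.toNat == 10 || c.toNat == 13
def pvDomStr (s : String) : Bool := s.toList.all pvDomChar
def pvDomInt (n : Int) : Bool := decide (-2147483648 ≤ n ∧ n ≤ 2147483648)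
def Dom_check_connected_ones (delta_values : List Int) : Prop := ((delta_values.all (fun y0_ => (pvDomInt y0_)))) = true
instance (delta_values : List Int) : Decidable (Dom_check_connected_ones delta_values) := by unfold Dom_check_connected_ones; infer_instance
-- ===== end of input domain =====

-- B replaces A's two-flag state machine with three phases (skip prefix, skip the run of 1's,
-- then check no 1 remains); objective: simpler/alternative, same O(n) cost.

-- ===== PORT A =====
-- the for-loop of A, with its two flags as state; returning false models A's early 'return False'
def aLoop : List Int → Bool → Bool → Bool
  | [], found_one, _previous_was_one => found_one
  | value :: rest, found_one, previous_was_one =>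
    if value = 1 then
      if !found_one then aLoop rest true true            -- start of a new sequence of 1's
      else if !previous_was_one then false               -- found a 1 after a 0: return False
      else aLoop rest found_one true
    else aLoop rest found_one false                      -- reset previous_was_one

def check_connected_ones (delta_values : List Int) : Bool :=
  aLoop delta_values false false

-- ===== PORT B =====
-- first while loop of Source B: advance i past values ≠ 1 (i stays ≥ 0, so Nat is faithful)
def skipNon (l : List Int) (i : Nat) : Nat :=
  if h : i < l.length then
    if l[i] ≠ 1 then skipNon l (i + 1) else i
  else i
termination_by l.length - i

-- second while loop of Source B: advance i past values = 1
def skipRun (l : List Int) (i : Nat) : Nat :=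
  if h : i < l.length then
    if l[i] = 1 then skipRun l (i + 1) else i
  else i
termination_by l.length - i

def check_connected_ones_alt (delta_values : List Int) : Bool :=
  let i := skipNon delta_values 0
  if i = delta_values.length then false
  else
    let j := skipRun delta_values i
    -- '1 not in delta_values[j:]' — a slice from a nonnegative in-range index is List.drop
    !((delta_values.drop j).contains 1)

-- ===== PRECONDITION & SPEC =====
def Spec_check_connected_ones (delta_values : List Int) (out : Bool) : Prop := out = check_connected_ones_alt delta_values
instance (delta_values : List Int) (out : Bool) : Decidable (Spec_check_connected_ones delta_values out) := by unfold Spec_check_connected_ones; infer_instance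

-- ===== CLAIM (what is proved, stated in full; the proofs are below) =====
def Claim_equal_check_connected_ones : Prop := ∀ (delta_values : List Int), Dom_check_connected_ones delta_values → Spec_check_connected_ones delta_values (check_connected_ones delta_values)

-- ===== LEMMAS AND PROOFS =====

-- list-level views of B's two index loops
def sN : List Int → List Int
  | [] => []
  | v :: r => if v = 1 then v :: r else sN r

def sO : List Int → List Int
  | [] => []
  | v :: r => if v = 1 then sO r else v :: r

lemma skipNon_le (l : List Int) (i : Nat) : i ≤ l.length → skipNon l i ≤ l.length := by
  induction i using skipNon.induct (l := l) with
  | case1 i h hne ih => intro _; rw [skipNon, dif_pos h, if_pos hne]; exact ih (by omega)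
  | case2 i h hone => intro hi; rw [skipNon, dif_pos h, if_neg hone]; omega
  | case3 i h => intro hi; rw [skipNon, dif_neg h]; exact hi

lemma skipNon_drop (l : List Int) (i : Nat) : l.drop (skipNon l i) = sN (l.drop i) := by
  induction i using skipNon.induct (l := l) with
  | case1 i h hne ih =>
      rw [skipNon, dif_pos h, if_pos hne, ih, List.drop_eq_getElem_cons h, sN, if_neg]
      simpa using hne
  | case2 i h hone =>
      rw [skipNon, dif_pos h, if_neg hone, List.drop_eq_getElem_cons h, sN, if_pos]
      simpa using hone
  | case3 i h =>
      rw [skipNon, dif_neg h, List.drop_eq_nil_of_le (by omega)]; rfl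

lemma skipRun_drop (l : List Int) (i : Nat) : l.drop (skipRun l i) = sO (l.drop i) := by
  induction i using skipRun.induct (l := l) with
  | case1 i h hone ih =>
      rw [skipRun, dif_pos h, if_pos hone, ih, List.drop_eq_getElem_cons h, sO, if_pos hone]
  | case2 i h hne =>
      rw [skipRun, dif_pos h, if_neg hne, List.drop_eq_getElem_cons h, sO, if_neg hne]
  | case3 i h =>
      rw [skipRun, dif_neg h, List.drop_eq_nil_of_le (by omega)]; rfl

lemma aLoop_tf (l : List Int) : aLoop l true false = !l.contains 1 := by
  induction l with
  | nil => rfl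
  | cons v r ih =>
      rw [aLoop]
      by_cases hv : v = 1
      · simp [hv]
      · simp [hv, ih]
        exact fun _ h => hv h.symm

lemma aLoop_tt (l : List Int) : aLoop l true true = !(sO l).contains 1 := by
  induction l with
  | nil => rfl
  | cons v r ih =>
      rw [aLoop, sO]
      by_cases hv : v = 1
      · simp [hv, ih]
      · simp [hv, aLoop_tf]
        exact fun _ h => hv h.symm

lemma aLoop_ff (l : List Int) :
    aLoop l false false = if sN l = [] then false else !((sO (sN l)).contains 1) := by
  induction l with
  | nil => rfl
  | cons v r ih =>
      rw [aLoop, sN]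
      by_cases hv : v = 1
      · simp [hv, aLoop_tt, sO]
      · simp [hv, ih]

-- ===== VERDICT (by name: the statement is the Claim_ definition above) =====
theorem check_connected_ones_spec : Claim_equal_check_connected_ones := by
  intro l _
  show check_connected_ones l = check_connected_ones_alt l
  rw [check_connected_ones, check_connected_ones_alt, aLoop_ff]
  have hle : skipNon l 0 ≤ l.length := skipNon_le l 0 (Nat.zero_le _)
  have hdrop : l.drop (skipNon l 0) = sN l := by simpa using skipNon_drop l 0
  by_cases hend : skipNon l 0 = l.length
  · have : sN l = [] := by rw [← hdrop, hend, List.drop_length]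
    simp [hend, this]
  · have hlt : skipNon l 0 < l.length := lt_of_le_of_ne hle hend
    have hne : sN l ≠ [] := by
      rw [← hdrop]
      simp [List.drop_eq_nil_iff]
      omega
    simp only [if_neg hend, if_neg hne]
    rw [skipRun_drop, hdrop]
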